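-- pv_equiv track=rewrite | github.com/david-cattermole/mayaMatchMoveSolver | python/mmSolver/_api/solveraffects.py | _parse_usage_list
-- ===== SOURCE A (Python) =====
-- def _parse_usage_list(key, in_data):
--     split_char = '#'
--     out_data = [x for x in in_data if x.startswith(key)]
--     out_data = [x.partition(key)[-1] for x in out_data]
--     out_data = split_char.join(out_data)
--     out_data = out_data.split(split_char)
--     out_data = [x for x in out_data if len(x) > 0]
--     return out_data
-- ===== SOURCE B (Python) =====
-- def _parse_usage_list(key, in_data):
--     out = []
--     n = len(key)
--     for x in in_data:
--         if x[:n] == key: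
--             cur = []
--             for ch in x[n:] + '#':
--                 if ch == '#':
--                     if cur:
--                         out.append(''.join(cur))
--                     cur = []
--                 else:
--                     cur.append(ch)
--     return out
-- ===== Notes on version B (the rewrite author's own statement) =====
-- stated objective: alternative
-- what changed: Replaces the five-stage pipeline (prefix filter, partition-map, global '#'.join, re-split, empty filter) with a character-level state machine: one pass over each matching string's suffix with an explicit current-piece buffer that is flushed on '#' (and a sentinel '#' at the end), using no split/join/partition/startswith calls.
import Mathlib
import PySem

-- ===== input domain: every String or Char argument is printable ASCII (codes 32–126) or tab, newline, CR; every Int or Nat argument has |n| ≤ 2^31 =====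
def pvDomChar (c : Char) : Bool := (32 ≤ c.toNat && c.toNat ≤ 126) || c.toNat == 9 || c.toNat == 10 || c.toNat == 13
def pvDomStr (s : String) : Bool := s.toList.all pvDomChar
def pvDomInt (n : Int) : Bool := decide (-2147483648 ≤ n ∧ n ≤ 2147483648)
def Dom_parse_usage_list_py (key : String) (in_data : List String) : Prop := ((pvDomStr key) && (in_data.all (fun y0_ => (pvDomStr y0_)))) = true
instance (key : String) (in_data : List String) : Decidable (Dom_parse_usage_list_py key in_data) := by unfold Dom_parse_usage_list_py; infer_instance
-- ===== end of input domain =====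

-- B replaces A's five-stage pipeline (filter, partition-map, global '#'.join, re-split, filter) with a
-- character-level state machine flushing a current-piece buffer on '#' (alternative decomposition, same cost).

-- ===== PORT A =====
-- exact port of s.partition(key)[-1] for non-empty key (Python raises on an empty separator; Pre_ excludes that)
def pyPartitionLast (s key : List Char) : List Char :=
  let i := PySem.Chars.find s key
  if i = -1 then [] else s.drop (i.toNat + key.length)

def parse_usage_list_py (key : String) (in_data : List String) : List String :=
  let split_char : List Char := ['#']
  let out_data1 := in_data.filter (fun x => PySem.Str.startswith x key)
  let out_data2 := out_data1.map (fun x => pyPartitionLast x.toList key.toList)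
  let out_data3 := PySem.Chars.join split_char out_data2
  let out_data4 := PySem.Chars.splitOn out_data3 split_char
  let out_data5 := out_data4.filter (fun x => decide (0 < PySem.Chars.len x))
  out_data5.map String.ofList

-- ===== PORT B =====
-- the inner character loop of Source B: flush `cur` into `out` on '#', otherwise append the char to `cur`
def scanPieces : List Char → List Char → List String → List String
  | [], _, out => out
  | c :: cs, cur, out =>
    if c = '#' then scanPieces cs [] (if cur ≠ [] then out ++ [String.ofList cur] else out)
    else scanPieces cs (cur ++ [c]) out

def parse_usage_list_py_alt (key : String) (in_data : List String) : List String :=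
  let n := key.toList.length
  in_data.foldl (fun out x =>
    if x.toList.take n = key.toList then
      scanPieces (x.toList.drop n ++ ['#']) [] out
    else out) []

-- ===== PRECONDITION & SPEC =====
-- Pre_ excludes exactly the inputs on which A raises: key == '' with non-empty in_data
-- (str.partition('') is a ValueError on every element that passes the startswith filter, i.e. on all of them).
def Pre_parse_usage_list_py (key : String) (in_data : List String) : Prop := key = "" → in_data = []
instance (key : String) (in_data : List String) : Decidable (Pre_parse_usage_list_py key in_data) := by unfold Pre_parse_usage_list_py; infer_instance

def pvWitness_parse_usage_list_py : String × List String := ("u", ["ua#b", "x"])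

def Spec_parse_usage_list_py (key : String) (in_data : List String) (out : List String) : Prop := out = parse_usage_list_py_alt key in_data
instance (key : String) (in_data : List String) (out : List String) : Decidable (Spec_parse_usage_list_py key in_data out) := by unfold Spec_parse_usage_list_py; infer_instance

-- ===== CLAIM (what is proved, stated in full; the proofs are below) =====
def Claim_equal_parse_usage_list_py : Prop := ∀ (key : String) (in_data : List String), Dom_parse_usage_list_py key in_data → Pre_parse_usage_list_py key in_data → Spec_parse_usage_list_py key in_data (parse_usage_list_py key in_data)

-- ===== LEMMAS AND PROOFS =====

-- a clean structural model of single-character split, used to reason about PySem.Chars.splitOn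
def consHead (x : Char) : List (List Char) → List (List Char)
  | [] => [[x]]
  | h :: t => (x :: h) :: t

def mySplit (c : Char) : List Char → List (List Char)
  | [] => [[]]
  | x :: xs => if x = c then [] :: mySplit c xs else consHead x (mySplit c xs)

theorem consHead_ne_nil (x : Char) (l : List (List Char)) : consHead x l ≠ [] := by
  cases l <;> simp [consHead]

theorem mySplit_ne_nil (c : Char) (s : List Char) : mySplit c s ≠ [] := by
  cases s with
  | nil => simp [mySplit]
  | cons x xs =>
    simp only [mySplit]
    split
    · simp
    · exact consHead_ne_nil _ _

theorem splitOn_go_eq (c : Char) : ∀ (fuel : Nat) (l cur : List Char) (acc : List (List Char)),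
    l.length ≤ fuel →
    PySem.Chars.splitOn.go [c] fuel l cur acc
      = acc.reverse ++ (mySplit c l).modifyHead (fun h => cur.reverse ++ h) := by
  intro fuel
  induction fuel with
  | zero =>
    intro l cur acc h
    have hl : l = [] := by cases l <;> simp_all
    subst hl
    rw [PySem.Chars.splitOn.go.eq_def]
    simp [mySplit]
  | succ n ih =>
    intro l cur acc h
    cases l with
    | nil =>
      rw [PySem.Chars.splitOn.go.eq_def]
      simp [mySplit]
    | cons x xs =>
      obtain ⟨h0, t0, hsplit⟩ : ∃ h0 t0, mySplit c xs = h0 :: t0 := by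
        cases hm : mySplit c xs with
        | nil => exact absurd hm (mySplit_ne_nil _ _)
        | cons a b => exact ⟨a, b, rfl⟩
      rw [PySem.Chars.splitOn.go.eq_def]
      simp only [List.isPrefixOf, Bool.and_true]
      by_cases hx : c = x
      · subst hx
        simp only [beq_self_eq_true, if_true, List.length_cons, List.drop_succ_cons,
          List.length_nil, List.drop_zero]
        rw [ih xs [] (cur.reverse :: acc) (by simpa using h)]
        simp [mySplit, hsplit]
      · have hxc : x ≠ c := fun hh => hx hh.symm
        simp only [beq_iff_eq, hx, if_false]
        rw [ih xs (x :: cur) acc (by simpa using h)]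
        simp [mySplit, hxc, hsplit, consHead]

theorem splitOn_eq (c : Char) (s : List Char) : PySem.Chars.splitOn s [c] = mySplit c s := by
  unfold PySem.Chars.splitOn
  rw [splitOn_go_eq c (s.length + 1) s [] [] (by omega)]
  obtain ⟨h0, t0, hsplit⟩ : ∃ h0 t0, mySplit c s = h0 :: t0 := by
    cases hm : mySplit c s with
    | nil => exact absurd hm (mySplit_ne_nil _ _)
    | cons a b => exact ⟨a, b, rfl⟩
  simp [hsplit]

theorem consHead_append (x : Char) (l m : List (List Char)) (h : l ≠ []) :
    consHead x (l ++ m) = consHead x l ++ m := by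
  cases l with
  | nil => exact absurd rfl h
  | cons a b => simp [consHead]

theorem mySplit_append_cons (c : Char) (a b : List Char) :
    mySplit c (a ++ c :: b) = mySplit c a ++ mySplit c b := by
  induction a with
  | nil => simp [mySplit]
  | cons x xs ih =>
    simp only [List.cons_append, mySplit, ih]
    by_cases hx : x = c
    · simp [hx]
    · simp [hx, consHead_append x _ _ (mySplit_ne_nil c xs)]

theorem mySplit_join (c : Char) (p : List Char) (ps : List (List Char)) :
    mySplit c (PySem.Chars.join [c] (p :: ps)) = mySplit c p ++ ps.flatMap (mySplit c) := by
  induction ps generalizing p with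
  | nil => simp [PySem.Chars.join_singleton]
  | cons q qs ih =>
    rw [PySem.Chars.join_cons_cons]
    have harr : p ++ [c] ++ PySem.Chars.join [c] (q :: qs) = p ++ c :: PySem.Chars.join [c] (q :: qs) := by
      simp
    rw [harr, mySplit_append_cons, ih q]
    simp

theorem find_eq_zero_of_prefix (s k : List Char) (hk : k <+: s) : PySem.Chars.find s k = 0 := by
  have h0 : 0 ≤ PySem.Chars.find s k := (PySem.Chars.find_nonneg_iff s k).mpr hk.isInfix
  obtain ⟨_, h2⟩ := PySem.Chars.find_spec h0
  by_contra hne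
  have hpos : 0 < (PySem.Chars.find s k).toNat := by omega
  exact h2 0 hpos (by simpa using hk)

theorem partition_suffix (s k : List Char) (hsw : k <+: s) :
    pyPartitionLast s k = s.drop k.length := by
  unfold pyPartitionLast
  rw [find_eq_zero_of_prefix s k hsw]
  norm_num

theorem flatMap_congr_mem {α β : Type} (l : List α) (f g : α → List β)
    (h : ∀ x ∈ l, f x = g x) : l.flatMap f = l.flatMap g := by
  induction l with
  | nil => rfl
  | cons x xs ih =>
    simp only [List.flatMap_cons, h x (by simp), ih (fun y hy => h y (by simp [hy]))]

theorem modifyHead_id (l : List (List Char)) : l.modifyHead (fun h => h) = l := by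
  cases l <;> simp

-- the state machine computes exactly the '#'-split pieces (with the pending buffer `cur` prepended)
theorem scanPieces_eq (s cur : List Char) (out : List String) :
    scanPieces (s ++ ['#']) cur out
      = out ++ (((mySplit '#' s).modifyHead (fun h => cur ++ h)).filter
                  (fun p => decide (p ≠ []))).map String.ofList := by
  induction s generalizing cur out with
  | nil =>
    simp only [List.nil_append, scanPieces, mySplit]
    by_cases hcur : cur = [] <;> simp [hcur]
  | cons x xs ih =>
    by_cases hx : x = '#'
    · subst hx
      simp only [List.cons_append, scanPieces, mySplit]
      rw [ih [] _]
      by_cases hcur : cur = [] <;> simp [hcur, modifyHead_id]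
    · simp only [List.cons_append, scanPieces, if_neg hx, mySplit]
      rw [ih (cur ++ [x]) out]
      obtain ⟨h0, t0, hsplit⟩ : ∃ h0 t0, mySplit '#' xs = h0 :: t0 := by
        cases hm : mySplit '#' xs with
        | nil => exact absurd hm (mySplit_ne_nil _ _)
        | cons a b => exact ⟨a, b, rfl⟩
      simp [hsplit, consHead]

-- prefix-by-take equals startswith
theorem take_eq_iff_startswith (x key : String) :
    (x.toList.take key.toList.length = key.toList) ↔ PySem.Str.startswith x key = true := by
  simp only [PySem.Str.startswith_eq, PySem.Chars.startswith_iff]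
  constructor
  · intro h
    exact ⟨x.toList.drop key.toList.length,
      by conv_rhs => rw [← List.take_append_drop key.toList.length x.toList, h]⟩
  · intro h; exact (List.prefix_iff_eq_take.mp h).symm

-- the common flatMap normal form of both ports
theorem portB_eq_flatMap (key : String) (in_data : List String) :
    parse_usage_list_py_alt key in_data
      = (in_data.filter (fun x => PySem.Str.startswith x key)).flatMap
          (fun x => ((mySplit '#' (x.toList.drop key.toList.length)).filter
                      (fun p => decide (p ≠ []))).map String.ofList) := by
  unfold parse_usage_list_py_alt
  simp only []
  rw [PySem.List.foldl_congr_mem in_data _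
      (fun out x => if PySem.Str.startswith x key then
          out ++ ((mySplit '#' (x.toList.drop key.toList.length)).filter
                    (fun p => decide (p ≠ []))).map String.ofList else out)
      []
      (by
        intro acc x _
        beta_reduce
        by_cases hsw : PySem.Str.startswith x key = true
        · rw [if_pos ((take_eq_iff_startswith x key).mpr hsw), if_pos hsw]
          rw [scanPieces_eq]
          simp [modifyHead_id]
        · rw [if_neg (fun hh => hsw ((take_eq_iff_startswith x key).mp hh)), if_neg hsw])]
  rw [PySem.List.foldl_if_eq_foldl_filter, PySem.List.foldl_append_eq_flatMap]
  simp

theorem parse_usage_list_py_spec_aux (key : String) (in_data : List String)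
    (hpre : Pre_parse_usage_list_py key in_data) :
    parse_usage_list_py key in_data = parse_usage_list_py_alt key in_data := by
  by_cases hkey : key = ""
  · have hnil : in_data = [] := hpre hkey
    subst hnil
    simp [parse_usage_list_py, parse_usage_list_py_alt, splitOn_eq, mySplit,
          PySem.Chars.join_nil, PySem.Chars.len]
  · rw [portB_eq_flatMap]
    unfold parse_usage_list_py
    simp only []
    cases hl : in_data.filter (fun x => PySem.Str.startswith x key) with
    | nil =>
      simp [PySem.Chars.join_nil, splitOn_eq, mySplit, PySem.Chars.len]
    | cons y ys =>
      have hmem : ∀ x ∈ y :: ys, PySem.Str.startswith x key = true := by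
        intro x hx
        rw [← hl] at hx
        exact (List.mem_filter.mp hx).2
      simp only [List.map_cons]
      rw [splitOn_eq, mySplit_join]
      have hmaps : mySplit '#' (pyPartitionLast y.toList key.toList)
            ++ (ys.map (fun x => pyPartitionLast x.toList key.toList)).flatMap (mySplit '#')
          = (y :: ys).flatMap (fun x => mySplit '#' (pyPartitionLast x.toList key.toList)) := by
        simp [List.flatMap_map]
      rw [hmaps, List.filter_flatMap, List.map_flatMap]
      refine flatMap_congr_mem _ _ _ ?_
      intro x hx
      have hsw : key.toList <+: x.toList :=
        (PySem.Chars.startswith_iff x.toList key.toList).mp (by simpa using hmem x hx)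
      rw [partition_suffix x.toList key.toList hsw]
      congr 1
      refine List.filter_congr ?_
      intro p _
      simp [PySem.Chars.len, List.length_pos_iff_ne_nil]

-- ===== VERDICT (by name: the statement is the Claim_ definition above) =====
theorem parse_usage_list_py_spec : Claim_equal_parse_usage_list_py := by
  intro key in_data _ hpre
  unfold Spec_parse_usage_list_py
  exact parse_usage_list_py_spec_aux key in_data hpre
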